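-- pv_equiv track=rewrite | github.com/ganjiron/ganpython | HW/hw14b.py | sums_to
-- ===== SOURCE A (Python) =====
-- def sums_to(nums,k):
--     if nums == [] and k == 0:
--         return True
--     elif nums == [] and k != 0:
--         return False
--     else:
--         k -= nums[0]
--         return sums_to(nums[1:] , k)
-- ===== SOURCE B (Python) =====
-- def sums_to(nums, k):
--     total = 0
--     for x in nums:
--         total += x
--     return total == k
-- ===== Notes on version B (the rewrite author's own statement) =====
-- stated objective: simpler
-- what changed: Replaced the recursive slice-and-subtract decomposition with a single iterative accumulator loop that sums the list and compares once.
import Mathlib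
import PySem

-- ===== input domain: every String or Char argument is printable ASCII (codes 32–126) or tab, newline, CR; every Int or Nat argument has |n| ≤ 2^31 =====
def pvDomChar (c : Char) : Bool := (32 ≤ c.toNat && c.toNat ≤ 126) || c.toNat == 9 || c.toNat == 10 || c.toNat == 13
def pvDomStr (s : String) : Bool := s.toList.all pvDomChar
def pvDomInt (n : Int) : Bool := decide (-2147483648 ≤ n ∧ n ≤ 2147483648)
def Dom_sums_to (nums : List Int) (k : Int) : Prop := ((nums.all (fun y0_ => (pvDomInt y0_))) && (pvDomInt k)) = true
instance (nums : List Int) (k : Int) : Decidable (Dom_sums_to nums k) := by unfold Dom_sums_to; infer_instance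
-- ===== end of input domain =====

-- B replaces A's recursive slice-and-subtract with one iterative accumulator loop (simpler).

-- ===== PORT A =====
-- A recurses: empty list returns k == 0, else subtracts nums[0] from k and recurses on nums[1:].
def sums_to (nums : List Int) (k : Int) : Bool :=
  if nums = [] ∧ k = 0 then true
  else if nums = [] ∧ k ≠ 0 then false
  else
    match nums with
    | [] => false  -- unreachable: nums ≠ [] here
    | x :: rest => sums_to rest (k - x)

-- ===== PORT B =====
-- B: total = 0; for x in nums: total += x; return total == k.
def sums_to_alt (nums : List Int) (k : Int) : Bool :=
  (nums.foldl (fun total x => total + x) 0) == k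

-- ===== PRECONDITION & SPEC =====
def Spec_sums_to (nums : List Int) (k : Int) (out : Bool) : Prop := out = sums_to_alt nums k
instance (nums : List Int) (k : Int) (out : Bool) : Decidable (Spec_sums_to nums k out) := by unfold Spec_sums_to; infer_instance

-- ===== CLAIM (what is proved, stated in full; the proofs are below) =====
def Claim_equal_sums_to : Prop := ∀ (nums : List Int) (k : Int), Dom_sums_to nums k → Spec_sums_to nums k (sums_to nums k)

-- ===== LEMMAS AND PROOFS =====

theorem sums_to_eq_sum : ∀ (nums : List Int) (k : Int), sums_to nums k = (nums.sum == k) := by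
  intro nums
  induction nums with
  | nil =>
      intro k
      by_cases h : k = 0 <;> simp [sums_to, h] <;> omega
  | cons x rest ih =>
      intro k
      rw [show sums_to (x :: rest) k = sums_to rest (k - x) from by simp [sums_to], ih]
      simp only [List.sum_cons]
      rw [Bool.eq_iff_iff]
      simp only [beq_iff_eq]
      omega

theorem alt_eq_sum : ∀ (nums : List Int) (k : Int), sums_to_alt nums k = (nums.sum == k) := by
  intro nums k
  simp [sums_to_alt, List.sum_eq_foldl]

-- ===== VERDICT (by name: the statement is the Claim_ definition above) =====
theorem sums_to_spec : Claim_equal_sums_to := by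
  intro nums k _
  unfold Spec_sums_to
  rw [sums_to_eq_sum, alt_eq_sum]
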